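-- pv_equiv track=rewrite | github.com/javierrcastroo/Integraci-n-Rob-tica-Visi-n-RL | catkin_ws/src/vc_battleship/src/game_board_validation.py | validate_ship2
-- ===== SOURCE A (Python) =====
-- from typing import Dict, Iterable, List, Sequence, Set, Tuple
--
-- def validate_ship2(cells: Sequence[Tuple[int, int]]):
--     if len(cells) != 2:
--         return False
--
--     rows = {r for r, _ in cells}
--     cols = {c for _, c in cells}
--     if len(rows) == 1:
--         seq = sorted(c for _, c in cells)
--     elif len(cols) == 1:
--         seq = sorted(r for r, _ in cells)
--     else:
--         return False
--
--     return seq[1] - seq[0] == 1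
-- ===== SOURCE B (Python) =====
-- def validate_ship2(cells):
--     if len(cells) != 2:
--         return False
--     (r1, c1), (r2, c2) = cells
--     return abs(r1 - r2) + abs(c1 - c2) == 1
-- ===== Notes on version B (the rewrite author's own statement) =====
-- stated objective: simpler
-- what changed: Replaces the set-building, axis branching and sorting with a direct Manhattan-distance test: the two cells are an adjacent ship iff |r1-r2|+|c1-c2| == 1.
import Mathlib
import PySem

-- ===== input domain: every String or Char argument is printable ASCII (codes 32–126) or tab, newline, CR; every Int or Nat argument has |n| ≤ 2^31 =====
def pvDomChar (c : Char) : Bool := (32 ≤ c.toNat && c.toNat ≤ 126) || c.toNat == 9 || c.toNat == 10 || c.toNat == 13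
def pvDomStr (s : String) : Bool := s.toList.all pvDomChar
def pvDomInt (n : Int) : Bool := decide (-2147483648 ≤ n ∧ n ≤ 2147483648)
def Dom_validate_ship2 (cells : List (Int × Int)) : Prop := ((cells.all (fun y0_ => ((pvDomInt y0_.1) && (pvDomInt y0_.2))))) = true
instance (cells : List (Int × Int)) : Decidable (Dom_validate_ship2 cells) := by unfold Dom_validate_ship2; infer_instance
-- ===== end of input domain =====

-- B replaces A's set-building, axis branching and sorting by a direct Manhattan-distance test (simpler).


-- ===== PORT A =====
def validate_ship2 (cells : List (Int × Int)) : Bool :=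
  if cells.length ≠ 2 then false
  else
    let rows := PySem.Set.ofList (cells.map Prod.fst)
    let cols := PySem.Set.ofList (cells.map Prod.snd)
    if rows.length = 1 then
      let seq := PySem.List.sorted (cells.map Prod.snd) (fun x => x) false
      match PySem.List.pyGet? seq 1, PySem.List.pyGet? seq 0 with
      | some a, some b => a - b == 1
      | _, _ => false  -- unreachable: seq has length 2 here
    else if cols.length = 1 then
      let seq := PySem.List.sorted (cells.map Prod.fst) (fun x => x) false
      match PySem.List.pyGet? seq 1, PySem.List.pyGet? seq 0 with
      | some a, some b => a - b == 1
      | _, _ => false  -- unreachable: seq has length 2 here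
    else false

-- ===== PORT B =====
def validate_ship2_alt (cells : List (Int × Int)) : Bool :=
  match cells with
  | [(r1, c1), (r2, c2)] => (r1 - r2).natAbs + (c1 - c2).natAbs == 1
  | _ => false

-- ===== PRECONDITION & SPEC =====
def Spec_validate_ship2 (cells : List (Int × Int)) (out : Bool) : Prop := out = validate_ship2_alt cells
instance (cells : List (Int × Int)) (out : Bool) : Decidable (Spec_validate_ship2 cells out) := by unfold Spec_validate_ship2; infer_instance

-- ===== CLAIM (what is proved, stated in full; the proofs are below) =====
def Claim_equal_validate_ship2 : Prop := ∀ (cells : List (Int × Int)), Dom_validate_ship2 cells → Spec_validate_ship2 cells (validate_ship2 cells)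

-- ===== LEMMAS AND PROOFS =====
theorem sorted_two (a b : Int) :
    PySem.List.sorted [a, b] (fun x => x) false = if b < a then [b, a] else [a, b] := by
  by_cases h : b < a
  · simp only [h, if_true]
    exact PySem.List.sorted_id_eq_of_perm_of_pairwise [a, b] [b, a] (List.Perm.swap a b [])
      (by simp [List.pairwise_cons]; omega)
  · simp only [h, if_false]
    exact PySem.List.sorted_id_eq_of_perm_of_pairwise [a, b] [a, b] (List.Perm.refl _)
      (by simp [List.pairwise_cons]; omega)

theorem validate_ship2_pair (r1 c1 r2 c2 : Int) :
    validate_ship2 [(r1, c1), (r2, c2)] = validate_ship2_alt [(r1, c1), (r2, c2)] := by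
  simp only [validate_ship2, validate_ship2_alt, List.map]
  by_cases hr : r1 = r2 <;> by_cases hc : c1 = c2 <;>
    simp [hr, hc, PySem.Set.ofList, PySem.Set.add, sorted_two, PySem.List.pyGet?,
      PySem.List.pyIdx?] <;>
    split_ifs <;> simp_all <;> omega

-- ===== VERDICT (by name: the statement is the Claim_ definition above) =====
theorem validate_ship2_spec : Claim_equal_validate_ship2 := by
  intro cells _
  unfold Spec_validate_ship2
  match cells with
  | [] => simp [validate_ship2, validate_ship2_alt]
  | [_] => simp [validate_ship2, validate_ship2_alt]
  | (r1, c1) :: (r2, c2) :: [] => exact validate_ship2_pair r1 c1 r2 c2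
  | _ :: _ :: _ :: t => simp [validate_ship2, validate_ship2_alt]
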